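-- pv_equiv track=rewrite | github.com/AvishmitaMandal/LeetCode | 0130-surrounded-regions/0130-surrounded-regions.py | isSurrounded
-- ===== SOURCE A (Python) =====
-- def isSurrounded(comp, board):
--     m, n = len(board), len(board[0])
--     isSurrounded = True
--     directions = ((0,1),(0,-1),(1,0),(-1,0))
--
--     for x,y in comp:
--         for dx,dy in directions:
--             nx, ny = x+dx, y+dy
--             if not (0 <= nx < m and 0 <= ny < n):
--                 isSurrounded = False
--                 return isSurrounded
--
--     return isSurrounded
-- ===== SOURCE B (Python) =====
-- def isSurrounded(comp, board):
--     m, n = len(board), len(board[0])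
--     return all(0 < x < m - 1 and 0 < y < n - 1 for x, y in comp)
-- ===== Notes on version B (the rewrite author's own statement) =====
-- stated objective: simpler
-- what changed: Drops the inner loop over the four direction offsets and the mutable flag with early return; instead tests each cell directly against the closed-form strict-interior condition 0 < x < m-1 and 0 < y < n-1 with all().
import Mathlib
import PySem

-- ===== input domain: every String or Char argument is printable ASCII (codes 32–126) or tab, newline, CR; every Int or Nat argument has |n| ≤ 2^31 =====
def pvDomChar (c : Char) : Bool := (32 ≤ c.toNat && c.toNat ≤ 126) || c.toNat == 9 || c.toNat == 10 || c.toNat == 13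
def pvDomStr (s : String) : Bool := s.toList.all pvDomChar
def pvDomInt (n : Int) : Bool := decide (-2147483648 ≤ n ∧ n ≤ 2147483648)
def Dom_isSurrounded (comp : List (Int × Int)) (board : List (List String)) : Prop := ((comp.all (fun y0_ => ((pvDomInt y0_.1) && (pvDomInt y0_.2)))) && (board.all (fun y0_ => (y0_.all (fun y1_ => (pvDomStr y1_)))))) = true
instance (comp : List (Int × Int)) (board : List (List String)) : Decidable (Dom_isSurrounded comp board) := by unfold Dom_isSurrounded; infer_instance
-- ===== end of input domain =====

-- B replaces the four-direction neighbour loop and early-return flag by a direct strict-interior test per cell (simpler decomposition).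
-- Python A raises IndexError on board = [] (board[0]); Pre_ excludes exactly that.
-- ===== PORT A =====
-- inner 'for dx,dy in directions' loop: returns true iff some neighbour is out of bounds (A then returns False)
def pvDirLoop (m n x y : Int) : List (Int × Int) → Bool
  | [] => false
  | (dx, dy) :: ds =>
    let nx := x + dx
    let ny := y + dy
    if ¬ (0 ≤ nx ∧ nx < m ∧ 0 ≤ ny ∧ ny < n) then true else pvDirLoop m n x y ds

-- outer 'for x,y in comp' loop with the early return
def pvCompLoop (m n : Int) : List (Int × Int) → Bool
  | [] => true
  | (x, y) :: rest =>
    if pvDirLoop m n x y [(0, 1), (0, -1), (1, 0), (-1, 0)] then false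
    else pvCompLoop m n rest

def isSurrounded (comp : List (Int × Int)) (board : List (List String)) : Bool :=
  let m : Int := board.length
  let n : Int := (board.headD []).length   -- len(board[0]); Pre_ guarantees board ≠ []
  pvCompLoop m n comp

-- ===== PORT B =====
def isSurrounded_alt (comp : List (Int × Int)) (board : List (List String)) : Bool :=
  let m : Int := board.length
  let n : Int := (board.headD []).length
  comp.all (fun p => decide (0 < p.1 ∧ p.1 < m - 1 ∧ 0 < p.2 ∧ p.2 < n - 1))

-- ===== PRECONDITION & SPEC =====
-- A evaluates board[0], which raises IndexError on an empty board; Pre_ excludes exactly that.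
def Pre_isSurrounded (comp : List (Int × Int)) (board : List (List String)) : Prop := board ≠ []
instance (comp : List (Int × Int)) (board : List (List String)) : Decidable (Pre_isSurrounded comp board) := by unfold Pre_isSurrounded; infer_instance
def pvWitness_isSurrounded : (List (Int × Int)) × List (List String) :=
  ([(1, 1)], [["X", "X", "X"], ["X", "O", "X"], ["X", "X", "X"]])
def Spec_isSurrounded (comp : List (Int × Int)) (board : List (List String)) (out : Bool) : Prop := out = isSurrounded_alt comp board
instance (comp : List (Int × Int)) (board : List (List String)) (out : Bool) : Decidable (Spec_isSurrounded comp board out) := by unfold Spec_isSurrounded; infer_instance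

-- ===== CLAIM (what is proved, stated in full; the proofs are below) =====
def Claim_equal_isSurrounded : Prop := ∀ (comp : List (Int × Int)) (board : List (List String)), Dom_isSurrounded comp board → Pre_isSurrounded comp board → Spec_isSurrounded comp board (isSurrounded comp board)

-- ===== LEMMAS AND PROOFS =====
-- per-cell: the direction scan finds an out-of-bounds neighbour iff the cell is NOT in the strict interior
theorem pvDirLoop_eq (m n x y : Int) :
    pvDirLoop m n x y [(0, 1), (0, -1), (1, 0), (-1, 0)]
      = ! decide (0 < x ∧ x < m - 1 ∧ 0 < y ∧ y < n - 1) := by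
  simp only [pvDirLoop]
  split_ifs <;> simp_all <;> omega

theorem pvCompLoop_eq (m n : Int) (comp : List (Int × Int)) :
    pvCompLoop m n comp
      = comp.all (fun p => decide (0 < p.1 ∧ p.1 < m - 1 ∧ 0 < p.2 ∧ p.2 < n - 1)) := by
  induction comp with
  | nil => rfl
  | cons p rest ih =>
    obtain ⟨x, y⟩ := p
    simp only [pvCompLoop, pvDirLoop_eq, List.all_cons, ih]
    by_cases h : 0 < x ∧ x < m - 1 ∧ 0 < y ∧ y < n - 1 <;> simp [h]

-- ===== VERDICT (by name: the statement is the Claim_ definition above) =====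
theorem isSurrounded_spec : Claim_equal_isSurrounded := by
  intro comp board _ _
  unfold Spec_isSurrounded isSurrounded isSurrounded_alt
  exact pvCompLoop_eq _ _ comp
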